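-- pv_equiv track=rewrite | github.com/acbackens/AtBSwP | Chapter5Dictionaries/Chapter5Dictionaries.py | addToInventory
-- ===== SOURCE A (Python) =====
-- def addToInventory(inventory, addedItems):
--     count = {}
--     for x in addedItems:
--         if x not in count:
--             count.setdefault(x, 0)
--             count[x] += 1
--         else:
--             count[x] += 1
--
--     for k, v in count.items():
--         if k not in inventory.keys():
--             inventory.setdefault(k, v)
--         else:
--             inventory[k] = inventory.get(k, 0) + v
--
--     return inventory
-- ===== SOURCE B (Python) =====
-- def addToInventory(inventory, addedItems):
--     for x in addedItems:
--         inventory[x] = inventory.get(x, 0) + 1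
--     return inventory
-- ===== Notes on version B (the rewrite author's own statement) =====
-- stated objective: simpler
-- what changed: B drops A's intermediate count dict and its two-phase count-then-merge structure, incrementing the inventory directly in a single pass over addedItems.
import Mathlib
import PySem

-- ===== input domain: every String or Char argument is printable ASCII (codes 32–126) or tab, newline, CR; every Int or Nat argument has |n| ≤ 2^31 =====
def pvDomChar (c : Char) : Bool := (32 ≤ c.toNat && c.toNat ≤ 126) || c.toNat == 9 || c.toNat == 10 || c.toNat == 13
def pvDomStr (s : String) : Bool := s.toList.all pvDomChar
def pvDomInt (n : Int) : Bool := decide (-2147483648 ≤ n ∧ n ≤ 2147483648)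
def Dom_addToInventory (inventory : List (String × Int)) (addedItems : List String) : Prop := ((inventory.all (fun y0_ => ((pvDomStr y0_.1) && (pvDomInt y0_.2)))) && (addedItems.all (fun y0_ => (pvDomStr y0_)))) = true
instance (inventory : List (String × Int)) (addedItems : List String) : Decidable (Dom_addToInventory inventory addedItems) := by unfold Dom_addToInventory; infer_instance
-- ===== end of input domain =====

-- B replaces A's two-phase count-then-merge with a single direct pass over addedItems (simpler).
-- Python A mutates `inventory` in place and returns it; the equivalence proved here is about the return value.

-- ===== PORT A =====
-- A: first build a count dict over addedItems, then merge it into inventory, key by key.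
def addToInventory (inventory : List (String × Int)) (addedItems : List String) : List (String × Int) :=
  let count : PySem.Dict String Int :=
    addedItems.foldl (fun c x =>
      if c.contains x = false then
        (c.setdefault x 0).modify x 0 (· + 1)
      else
        c.modify x 0 (· + 1)) PySem.Dict.empty
  let inv :=
    count.items.foldl (fun d kv =>
      if d.contains kv.1 = false then
        d.setdefault kv.1 kv.2
      else
        d.insert kv.1 (d.getD kv.1 0 + kv.2)) (PySem.Dict.ofList inventory)
  inv.items

-- ===== PORT B =====
def addToInventory_alt (inventory : List (String × Int)) (addedItems : List String) : List (String × Int) :=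
  (addedItems.foldl (fun d x => d.insert x (d.getD x 0 + 1)) (PySem.Dict.ofList inventory)).items

-- ===== PRECONDITION & SPEC =====
def Spec_addToInventory (inventory : List (String × Int)) (addedItems : List String) (out : List (String × Int)) : Prop := out = addToInventory_alt inventory addedItems
instance (inventory : List (String × Int)) (addedItems : List String) (out : List (String × Int)) : Decidable (Spec_addToInventory inventory addedItems out) := by unfold Spec_addToInventory; infer_instance

-- ===== CLAIM (what is proved, stated in full; the proofs are below) =====
def Claim_equal_addToInventory : Prop := ∀ (inventory : List (String × Int)) (addedItems : List String), Dom_addToInventory inventory addedItems → Spec_addToInventory inventory addedItems (addToInventory inventory addedItems)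

-- ===== LEMMAS AND PROOFS =====

-- A's first loop body equals the Counter step, dict for dict.
theorem countStep_eq :
    (fun (c : PySem.Dict String Int) x =>
      if c.contains x = false then (c.setdefault x 0).modify x 0 (· + 1)
      else c.modify x 0 (· + 1))
    = fun (c : PySem.Dict String Int) x => c.modify x 0 (· + 1) := by
  funext c x
  by_cases h : c.contains x = false
  · simp only [h, if_pos]
    rw [PySem.Dict.setdefault_of_not_contains c 0 h]
    show ((c.insert x 0).insert x ((c.insert x 0).getD x 0 + 1))
        = c.insert x (c.getD x 0 + 1)
    rw [PySem.Dict.getD_insert_self, PySem.Dict.insert_insert_self,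
        PySem.Dict.getD_of_not_contains c 0 h]
  · simp [h]

-- A's merge-loop body equals a plain "add v onto the counted key", dict for dict.
theorem mergeStep_eq :
    (fun (d : PySem.Dict String Int) (kv : String × Int) =>
      if d.contains kv.1 = false then d.setdefault kv.1 kv.2
      else d.insert kv.1 (d.getD kv.1 0 + kv.2))
    = fun (d : PySem.Dict String Int) kv => d.insert kv.1 (d.getD kv.1 0 + kv.2) := by
  funext d kv
  by_cases h : d.contains kv.1 = false
  · simp only [h, if_pos]
    rw [PySem.Dict.setdefault_of_not_contains d kv.2 h,
        PySem.Dict.getD_of_not_contains d 0 h, Int.zero_add]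
  · simp [h]

-- Folding the merge step over distinct (key, value) pairs: lookup afterwards.
theorem foldl_merge_getD (S : List String) (cnt : String → Int) :
    ∀ (d : PySem.Dict String Int) (v : String), S.Nodup →
      ((S.map (fun k => (k, cnt k))).foldl
          (fun d kv => d.insert kv.1 (d.getD kv.1 0 + kv.2)) d).getD v 0
        = if v ∈ S then d.getD v 0 + cnt v else d.getD v 0 := by
  induction S with
  | nil => intro d v _; simp
  | cons k rest ih =>
    intro d v hnd
    have hnd' : rest.Nodup := hnd.of_cons
    simp only [List.map_cons, List.foldl_cons]
    rw [ih _ v hnd']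
    by_cases hv : v = k
    · subst hv
      have hv' : v ∉ rest := (List.nodup_cons.mp hnd).1
      simp [hv', PySem.Dict.getD_insert_self]
    · have : ((d.insert k (d.getD k 0 + cnt k)).getD v 0) = d.getD v 0 :=
        PySem.Dict.getD_insert_of_ne d _ _ hv
      simp [hv, this]

-- Claim-level abbreviations for the two result dicts.
theorem dictA_eq (inventory : List (String × Int)) (addedItems : List String) :
    addToInventory inventory addedItems
      = (((PySem.Set.ofList addedItems).map
            (fun k => (k, (addedItems.count k : Int)))).foldl
          (fun d kv => d.insert kv.1 (d.getD kv.1 0 + kv.2))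
          (PySem.Dict.ofList inventory)).items := by
  unfold addToInventory
  rw [countStep_eq, mergeStep_eq]
  simp only [← PySem.Dict.counter_eq_foldl, PySem.Dict.items_counter]

-- Keys of the two results coincide (same list, first-appearance order).
theorem keys_eq (inventory : List (String × Int)) (addedItems : List String) :
    (((PySem.Set.ofList addedItems).map
        (fun k => (k, (addedItems.count k : Int)))).foldl
      (fun d kv => d.insert kv.1 (d.getD kv.1 0 + kv.2))
      (PySem.Dict.ofList inventory)).keys
    = ((addedItems.foldl (fun d x => d.insert x (d.getD x 0 + 1))
        (PySem.Dict.ofList inventory))).keys := by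
  rw [PySem.Dict.keys_foldl_insert_key _ (fun kv : String × Int => kv.1)
        (fun d kv => d.getD kv.1 0 + kv.2),
      PySem.Dict.keys_foldl_insert]
  rw [List.map_map]
  have : ((fun kv : String × Int => kv.1) ∘ fun k => (k, (addedItems.count k : Int)))
      = id := by funext k; rfl
  rw [this, List.map_id]
  rw [PySem.Set.update_eq_append_filter, PySem.Set.update_eq_append_filter,
      PySem.Set.ofList_ofList]

-- ===== VERDICT (by name: the statement is the Claim_ definition above) =====
theorem addToInventory_spec : Claim_equal_addToInventory := by
  intro inventory addedItems _
  show addToInventory inventory addedItems = addToInventory_alt inventory addedItems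
  rw [dictA_eq]
  unfold addToInventory_alt
  set d0 := PySem.Dict.ofList inventory with hd0
  have hnd0 : d0.keys.Nodup := PySem.Dict.nodup_keys_ofList inventory
  have hndA : ((((PySem.Set.ofList addedItems).map
      (fun k => (k, (addedItems.count k : Int)))).foldl
      (fun d kv => d.insert kv.1 (d.getD kv.1 0 + kv.2)) d0)).keys.Nodup :=
    PySem.Dict.nodup_keys_foldl_insert_key _ (fun kv : String × Int => kv.1)
      (fun d kv => d.getD kv.1 0 + kv.2) d0 hnd0
  have hndB : ((addedItems.foldl (fun d x => d.insert x (d.getD x 0 + 1)) d0)).keys.Nodup :=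
    PySem.Dict.nodup_keys_foldl_insert _ (fun d x => d.getD x 0 + 1) d0 hnd0
  rw [PySem.Dict.items_eq_map_keys _ hndA 0, PySem.Dict.items_eq_map_keys _ hndB 0]
  rw [keys_eq]
  apply List.map_congr_left
  intro k _
  have hget : ∀ v, (((PySem.Set.ofList addedItems).map
      (fun k => (k, (addedItems.count k : Int)))).foldl
      (fun d kv => d.insert kv.1 (d.getD kv.1 0 + kv.2)) d0).getD v 0
      = (addedItems.foldl (fun d x => d.insert x (d.getD x 0 + 1)) d0).getD v 0 := by
    intro v
    rw [foldl_merge_getD _ _ d0 v (PySem.Set.nodup_ofList addedItems),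
        PySem.Dict.getD_foldl_insert_add_one]
    by_cases hv : v ∈ addedItems
    · simp [PySem.Set.mem_ofList, hv]
    · simp [PySem.Set.mem_ofList, hv, List.count_eq_zero_of_not_mem hv]
  rw [hget k]
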